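-- pv_equiv track=rewrite | github.com/Hang858/AntragZ | include/cal_lw_params_131.py | generate_weights_and_coeffs
-- ===== SOURCE A (Python) =====
-- def generate_weights_and_coeffs(z_seq):
--     """根据 z 序列生成权重和系数"""
--     weights = [1]
--     coeffs = [1]
--
--     for z in z_seq:
--         new_weights = []
--         new_coeffs = []
--         for w, a in zip(weights, coeffs):
--             # 权重分裂: w -> w*z, w*(z-1)
--             new_weights.append(w * z)
--             new_weights.append(w * (z - 1))
--
--             # 系数分裂 (Bézout系数):
--             # 使得 a'*(w*z) + b'*(w*(z-1)) = a*w
--             # 解为: a' = a, b' = -a (这是一个特解，且系数绝对值最小为1)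
--             # 验证: a*z + (-a)*(z-1) = az - az + a = a
--             new_coeffs.append(a)
--             new_coeffs.append(-a)
--
--         weights = new_weights
--         coeffs = new_coeffs
--     return weights, coeffs
-- ===== SOURCE B (Python) =====
-- def _split_at(zs, mask, d):
--     """One row of the split table: walk zs once, reading the bits of mask
--     from the most significant place value d/2 down; bit 0 picks factor z,
--     bit 1 picks factor z-1 and flips the sign."""
--     w = 1
--     sign = 1
--     for z in zs:
--         d //= 2
--         if (mask // d) % 2 == 1:
--             w *= z - 1
--             sign = -sign
--         else:
--             w *= z
--     return w, sign
--
--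
-- def generate_weights_and_coeffs(z_seq):
--     """根据 z 序列生成权重和系数"""
--     zs = list(z_seq)
--     n = len(zs)
--     weights = []
--     coeffs = []
--     # Enumerate all 2**n split choices directly by binary counting.
--     for mask in range(2 ** n):
--         w, sign = _split_at(zs, mask, 2 ** n)
--         weights.append(w)
--         coeffs.append(sign)
--     return weights, coeffs
-- ===== Notes on version B (the rewrite author's own statement) =====
-- stated objective: alternative
-- what changed: Replaces A's incremental doubling of two parallel lists (each element split in place every round) with direct binary-counting enumeration: for each mask in range(2**n) a single pass over zs reads the bits of mask most-significant-first and multiplies up that row's weight and sign.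
import Mathlib
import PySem

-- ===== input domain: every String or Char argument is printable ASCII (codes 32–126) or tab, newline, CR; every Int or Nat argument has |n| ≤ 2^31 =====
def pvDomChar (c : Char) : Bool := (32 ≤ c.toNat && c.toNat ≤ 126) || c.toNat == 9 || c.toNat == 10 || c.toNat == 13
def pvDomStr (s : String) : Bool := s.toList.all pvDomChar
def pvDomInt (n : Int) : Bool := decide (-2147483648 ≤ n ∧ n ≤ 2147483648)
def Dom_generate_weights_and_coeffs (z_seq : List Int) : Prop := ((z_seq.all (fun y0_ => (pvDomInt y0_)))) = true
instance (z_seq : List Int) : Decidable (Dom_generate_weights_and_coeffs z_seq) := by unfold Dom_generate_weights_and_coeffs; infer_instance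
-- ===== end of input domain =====

-- B replaces A's incremental list-doubling with direct binary-counting enumeration of the
-- 2^n split choices (objective: alternative decomposition, same exponential cost).

-- ===== PORT A =====
-- literal transliteration of A: doubling loop; inner loop over zip appends to new_weights/new_coeffs
def generate_weights_and_coeffs (z_seq : List Int) : List Int × List Int :=
  z_seq.foldl
    (fun st z =>
      (st.1.zip st.2).foldl
        (fun nw wa => (nw.1 ++ [wa.1 * z, wa.1 * (z - 1)], nw.2 ++ [wa.2, -wa.2]))
        ([], []))
    ([1], [1])

-- ===== PORT B =====
-- literal transliteration of Source B's helper _split_at: one pass over zs with state (w, sign, d)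
def pv_split_at (zs : List Int) (mask : Int) (d0 : Int) : Int × Int :=
  let r := zs.foldl
    (fun (st : Int × Int × Int) z =>
      let d := PySem.Int.floordiv st.2.2 2
      if PySem.Int.mod (PySem.Int.floordiv mask d) 2 = 1 then
        (st.1 * (z - 1), -st.2.1, d)
      else
        (st.1 * z, st.2.1, d))
    (1, 1, d0)
  (r.1, r.2.1)

-- literal transliteration of Source B: for each mask in range(2**n) compute one row and append it
def generate_weights_and_coeffs_alt (z_seq : List Int) : List Int × List Int :=
  let zs := z_seq
  let n := zs.length
  (PySem.List.pyRange 0 ((2 : Int) ^ n) 1).foldl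
    (fun acc mask =>
      let ws := pv_split_at zs mask ((2 : Int) ^ n)
      (acc.1 ++ [ws.1], acc.2 ++ [ws.2]))
    ([], [])

-- ===== PRECONDITION & SPEC =====
def Spec_generate_weights_and_coeffs (z_seq : List Int) (out : List Int × List Int) : Prop := out = generate_weights_and_coeffs_alt z_seq
instance (z_seq : List Int) (out : List Int × List Int) : Decidable (Spec_generate_weights_and_coeffs z_seq out) := by unfold Spec_generate_weights_and_coeffs; infer_instance

-- ===== CLAIM (what is proved, stated in full; the proofs are below) =====
def Claim_equal_generate_weights_and_coeffs : Prop := ∀ (z_seq : List Int), Dom_generate_weights_and_coeffs z_seq → Spec_generate_weights_and_coeffs z_seq (generate_weights_and_coeffs z_seq)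

-- ===== LEMMAS AND PROOFS =====

-- common characterisation of the result (proof-only)
def specW : List Int → List Int
  | [] => [1]
  | z :: t => ((specW t).map fun p => z * p) ++ ((specW t).map fun p => (z - 1) * p)

def specC : List Int → List Int
  | [] => [1]
  | _z :: t => specC t ++ ((specC t).map fun q => -q)

lemma specW_length (t : List Int) : (specW t).length = 2 ^ t.length := by
  induction t with
  | nil => simp [specW]
  | cons z t ih => simp [specW, ih]; ring

lemma specC_length (t : List Int) : (specC t).length = 2 ^ t.length := by
  induction t with
  | nil => simp [specC]
  | cons z t ih => simp [specC, ih]; ring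

lemma zipWith_left {α β : Type} : ∀ (l : List α) (l' : List β), l.length = l'.length →
    List.zipWith (fun a _ => a) l l' = l
  | [], [], _ => rfl
  | [], _ :: _, h => by simp at h
  | _ :: _, [], h => by simp at h
  | a :: l, b :: l', h => by
      simp only [List.zipWith_cons_cons, List.cons.injEq, true_and]
      exact zipWith_left l l' (by simpa using h)

lemma zipWith_right {α β : Type} : ∀ (l : List α) (l' : List β), l.length = l'.length →
    List.zipWith (fun _ b => b) l l' = l'
  | [], [], _ => rfl
  | [], _ :: _, h => by simp at h
  | _ :: _, [], h => by simp at h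
  | a :: l, b :: l', h => by
      simp only [List.zipWith_cons_cons, List.cons.injEq, true_and]
      exact zipWith_right l l' (by simpa using h)

-- ---- A side ----

lemma innerA (z : Int) : ∀ (pl : List (Int × Int)) (aw ac : List Int),
    pl.foldl (fun nw wa => (nw.1 ++ [wa.1 * z, wa.1 * (z - 1)], nw.2 ++ [wa.2, -wa.2])) (aw, ac)
      = (aw ++ pl.flatMap fun wa => [wa.1 * z, wa.1 * (z - 1)],
         ac ++ pl.flatMap fun wa => [wa.2, -wa.2])
  | [], aw, ac => by simp
  | p :: pl, aw, ac => by
      simp only [List.foldl_cons, List.flatMap_cons]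
      rw [innerA z pl (aw ++ [p.1 * z, p.1 * (z - 1)]) (ac ++ [p.2, -p.2])]
      simp [List.append_assoc]

lemma zipA_fst (z : Int) : ∀ (ws cs : List Int), ws.length = cs.length →
    ((ws.zip cs).flatMap fun wa => [wa.1 * z, wa.1 * (z - 1)])
      = ws.flatMap fun w => [w * z, w * (z - 1)]
  | [], [], _ => rfl
  | [], _ :: _, h => by simp at h
  | _ :: _, [], h => by simp at h
  | w :: ws, c :: cs, h => by
      simp only [List.zip_cons_cons, List.flatMap_cons]
      rw [zipA_fst z ws cs (by simpa using h)]

lemma zipA_snd : ∀ (ws cs : List Int), ws.length = cs.length →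
    ((ws.zip cs).flatMap fun wa => [wa.2, -wa.2]) = cs.flatMap fun a => [a, -a]
  | [], [], _ => rfl
  | [], _ :: _, h => by simp at h
  | _ :: _, [], h => by simp at h
  | w :: ws, c :: cs, h => by
      simp only [List.zip_cons_cons, List.flatMap_cons]
      rw [zipA_snd ws cs (by simpa using h)]

lemma len2w (z : Int) : ∀ (l : List Int),
    (l.flatMap fun w => [w * z, w * (z - 1)]).length = 2 * l.length
  | [] => rfl
  | x :: l => by simp [List.flatMap_cons, len2w z l]; ring

lemma len2c : ∀ (l : List Int), (l.flatMap fun a => [a, -a]).length = 2 * l.length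
  | [] => rfl
  | x :: l => by simp [List.flatMap_cons, len2c l]; ring

lemma A_loop : ∀ (zs ws cs : List Int), ws.length = cs.length →
    zs.foldl
      (fun st z =>
        (st.1.zip st.2).foldl
          (fun nw wa => (nw.1 ++ [wa.1 * z, wa.1 * (z - 1)], nw.2 ++ [wa.2, -wa.2]))
          ([], []))
      (ws, cs)
    = (ws.flatMap fun w => (specW zs).map fun p => w * p,
       cs.flatMap fun a => (specC zs).map fun q => a * q) := by
  intro zs
  induction zs with
  | nil =>
    intro ws cs h
    simp [specW, specC]
  | cons z t ih =>
    intro ws cs h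
    simp only [List.foldl_cons]
    rw [innerA, List.nil_append, List.nil_append, zipA_fst z ws cs h, zipA_snd ws cs h,
        ih _ _ (by rw [len2w, len2c, h])]
    refine Prod.ext ?_ ?_
    · simp only [specW, List.flatMap_assoc, List.map_append, List.map_map, List.flatMap_cons,
        List.flatMap_nil, List.append_nil]
      simp [mul_assoc]
    · simp only [specC, List.flatMap_assoc, List.map_append, List.map_map, List.flatMap_cons,
        List.flatMap_nil, List.append_nil]
      simp [Function.comp_def, neg_mul, mul_neg]

theorem A_eq (zs : List Int) : generate_weights_and_coeffs zs = (specW zs, specC zs) := by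
  unfold generate_weights_and_coeffs
  rw [A_loop zs [1] [1] rfl]
  simp

-- ---- B side ----

-- proof-side copy of _split_at's loop that keeps the final place value d (needed for the induction)
def brow (zs : List Int) (mask : Int) (w s d : Int) : Int × Int × Int :=
  zs.foldl
    (fun (st : Int × Int × Int) z =>
      if PySem.Int.mod (PySem.Int.floordiv mask (PySem.Int.floordiv st.2.2 2)) 2 = 1 then
        (st.1 * (z - 1), -st.2.1, PySem.Int.floordiv st.2.2 2)
      else
        (st.1 * z, st.2.1, PySem.Int.floordiv st.2.2 2))
    (w, s, d)

lemma split_at_eq (zs : List Int) (mask d : Int) :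
    pv_split_at zs mask d = ((brow zs mask 1 1 d).1, (brow zs mask 1 1 d).2.1) := rfl

lemma brow_cons (z : Int) (t : List Int) (mask w s d : Int) :
    brow (z :: t) mask w s d =
      if PySem.Int.mod (PySem.Int.floordiv mask (PySem.Int.floordiv d 2)) 2 = 1 then
        brow t mask (w * (z - 1)) (-s) (PySem.Int.floordiv d 2)
      else
        brow t mask (w * z) s (PySem.Int.floordiv d 2) := by
  simp only [brow, List.foldl_cons]
  split <;> rfl

lemma d_half (L : Nat) : PySem.Int.floordiv ((2 : Int) ^ (L + 1)) 2 = (2 : Int) ^ L := by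
  rw [PySem.Int.floordiv_eq_ediv_of_pos (by norm_num), pow_succ,
    Int.mul_ediv_cancel _ (by norm_num)]

lemma bitv (m L : Nat) :
    PySem.Int.mod (PySem.Int.floordiv ((m : Int)) ((2 : Int) ^ L)) 2
      = ((m / 2 ^ L % 2 : Nat) : Int) := by
  have h2 : ((2 : Int) ^ L) = ((2 ^ L : Nat) : Int) := by push_cast; ring
  have h3 : ((2 : Int)) = ((2 : Nat) : Int) := by norm_num
  rw [h2, PySem.Int.floordiv_natCast, h3, PySem.Int.mod_natCast]

lemma nf1 (m L c : Nat) : (c * 2 ^ (L + 1) + m) / 2 ^ L % 2 = m / 2 ^ L % 2 := by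
  have h : c * 2 ^ (L + 1) + m = m + c * 2 * 2 ^ L := by ring
  rw [h, Nat.add_mul_div_right _ _ (by positivity), Nat.add_mul_mod_self_right]

lemma nf3 (m L : Nat) (h : m < 2 ^ L) : (2 ^ L + m) / 2 ^ L % 2 = 1 := by
  rw [add_comm, Nat.add_div_right _ (by positivity), Nat.div_eq_of_lt h]

lemma brow_mask (t : List Int) : ∀ (w s : Int) (m c : Nat),
    brow t (((c * 2 ^ t.length + m : Nat) : Int)) w s ((2 : Int) ^ t.length)
      = brow t ((m : Int)) w s ((2 : Int) ^ t.length) := by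
  induction t with
  | nil => intro w s m c; rfl
  | cons z t ih =>
    intro w s m c
    simp only [List.length_cons]
    rw [brow_cons, brow_cons, d_half, bitv, bitv, nf1]
    have e : c * 2 ^ (t.length + 1) + m = c * 2 * 2 ^ t.length + m := by ring
    split
    · rw [e]; exact ih _ _ m (c * 2)
    · rw [e]; exact ih _ _ m (c * 2)

lemma brow_map (t : List Int) : ∀ (w s : Int),
    (List.range (2 ^ t.length)).map (fun (m : Nat) => brow t ((m : Int)) w s ((2 : Int) ^ t.length))
      = List.zipWith (fun p q => (w * p, s * q, (1 : Int))) (specW t) (specC t) := by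
  induction t with
  | nil =>
    intro w s
    simp [brow, specW, specC]
  | cons z t ih =>
    intro w s
    simp only [List.length_cons]
    have h2 : 2 ^ (t.length + 1) = 2 ^ t.length + 2 ^ t.length := by ring
    rw [h2, List.range_add, List.map_append, List.map_map]
    have hfst : ∀ m ∈ List.range (2 ^ t.length),
        brow (z :: t) ((m : Int)) w s ((2 : Int) ^ (t.length + 1))
          = brow t ((m : Int)) (w * z) s ((2 : Int) ^ t.length) := by
      intro m hm
      rw [brow_cons, d_half, bitv, Nat.div_eq_of_lt (List.mem_range.mp hm)]
      norm_num
    have hsnd : ∀ m ∈ List.range (2 ^ t.length),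
        brow (z :: t) (((2 ^ t.length + m : Nat) : Int)) w s ((2 : Int) ^ (t.length + 1))
          = brow t ((m : Int)) (w * (z - 1)) (-s) ((2 : Int) ^ t.length) := by
      intro m hm
      rw [brow_cons, d_half, bitv, nf3 m t.length (List.mem_range.mp hm), Nat.cast_one,
        if_pos rfl]
      have e : (2 ^ t.length + m : Nat) = 1 * 2 ^ t.length + m := by ring
      rw [e, brow_mask]
    have hcomp : ((fun (m : Nat) => brow (z :: t) ((m : Int)) w s ((2 : Int) ^ (t.length + 1))) ∘
          (fun (x : Nat) => 2 ^ t.length + x))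
        = fun (m : Nat) =>
            brow (z :: t) (((2 ^ t.length + m : Nat) : Int)) w s ((2 : Int) ^ (t.length + 1)) := rfl
    rw [hcomp, List.map_congr_left hfst, List.map_congr_left hsnd, ih, ih]
    simp only [specW, specC]
    rw [List.zipWith_append (by simp [specW_length, specC_length]),
        List.zipWith_map_left, List.zipWith_map_left, List.zipWith_map_right]
    refine congrArg₂ (· ++ ·) ?_ ?_
    · simp [mul_assoc]
    · simp [mul_assoc, neg_mul, mul_neg]

theorem B_eq (zs : List Int) : generate_weights_and_coeffs_alt zs = (specW zs, specC zs) := by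
  have hr : PySem.List.pyRange 0 ((2 : Int) ^ zs.length) 1
      = (List.range (2 ^ zs.length)).map (fun (k : Nat) => (k : Int)) := by
    have hc : ((2 : Int) ^ zs.length) = ((2 ^ zs.length : Nat) : Int) := by push_cast; ring
    rw [hc, PySem.List.pyRange_zero_nat]
  simp only [generate_weights_and_coeffs_alt, split_at_eq, hr, List.foldl_map]
  rw [PySem.List.foldl_prod_mk
        (f := fun a (k : Nat) => a ++ [(brow zs ((k : Int)) 1 1 ((2 : Int) ^ zs.length)).1])
        (g := fun a (k : Nat) => a ++ [(brow zs ((k : Int)) 1 1 ((2 : Int) ^ zs.length)).2.1]),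
      PySem.List.foldl_append_singleton_eq_map, PySem.List.foldl_append_singleton_eq_map,
      List.nil_append, List.nil_append]
  have hm := brow_map zs 1 1
  refine Prod.ext ?_ ?_
  · have h1 := congrArg (List.map (fun r : Int × Int × Int => r.1)) hm
    simp only [List.map_map, List.map_zipWith, Function.comp_def] at h1
    rw [h1]
    simp only [one_mul]
    exact zipWith_left _ _ (by rw [specW_length, specC_length])
  · have h1 := congrArg (List.map (fun r : Int × Int × Int => r.2.1)) hm
    simp only [List.map_map, List.map_zipWith, Function.comp_def] at h1
    rw [h1]
    simp only [one_mul]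
    exact zipWith_right _ _ (by rw [specW_length, specC_length])

-- ===== VERDICT (by name: the statement is the Claim_ definition above) =====
theorem generate_weights_and_coeffs_spec : Claim_equal_generate_weights_and_coeffs := by
  intro z_seq _
  unfold Spec_generate_weights_and_coeffs
  rw [A_eq, B_eq]
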